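-- pv_equiv track=rewrite | github.com/ebanner/daily-coding-challenges | 11-12/leetcode.py | dedupe_beauties
-- ===== SOURCE A (Python) =====
-- def dedupe_beauties(items):
--     deduped_beauties = {}
--     for [price, beauty] in items:
--         if price not in deduped_beauties:
--             deduped_beauties[price] = -1
--         deduped_beauties[price] = max(deduped_beauties[price], beauty)
--     deduped_beauties[0] = 0
--     return deduped_beauties
-- ===== SOURCE B (Python) =====
-- def dedupe_beauties(items):
--     groups = {}
--     for price, beauty in items:
--         groups.setdefault(price, []).append(beauty)
--     result = {price: max([-1] + beauties) for price, beauties in groups.items()}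
--     result[0] = 0
--     return result
-- ===== Notes on version B (the rewrite author's own statement) =====
-- stated objective: alternative
-- what changed: Replaces A's interleaved conditional-sentinel running-max dict update with a two-pass decomposition: first group beauties per price into lists (insertion order), then reduce each list with max([-1]+beauties), finally set result[0]=0.
import Mathlib
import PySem

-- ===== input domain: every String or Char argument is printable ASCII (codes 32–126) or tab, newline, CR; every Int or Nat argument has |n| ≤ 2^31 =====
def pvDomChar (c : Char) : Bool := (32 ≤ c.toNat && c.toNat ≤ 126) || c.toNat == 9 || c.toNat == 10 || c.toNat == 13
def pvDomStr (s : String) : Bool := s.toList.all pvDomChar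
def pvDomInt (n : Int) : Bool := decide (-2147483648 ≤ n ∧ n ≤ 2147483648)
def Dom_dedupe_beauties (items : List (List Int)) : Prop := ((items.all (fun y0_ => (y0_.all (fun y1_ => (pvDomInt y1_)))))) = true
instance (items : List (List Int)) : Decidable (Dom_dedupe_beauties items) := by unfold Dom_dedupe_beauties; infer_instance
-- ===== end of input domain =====

-- B replaces A's interleaved sentinel/running-max dict update by a two-pass decomposition
-- (group beauties per price into lists, then reduce each list with max([-1]+beauties)); same cost.


-- ===== PORT A =====
def dedupe_beauties (items : List (List Int)) : List (Int × Int) :=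
  let d : PySem.Dict Int Int :=
    items.foldl (fun d it =>
      match it with
      | [price, beauty] =>
        let d := if d.contains price then d else d.insert price (-1)
        d.insert price (max (d.getD price 0) beauty)
      | _ => d) PySem.Dict.empty
  (d.insert 0 0).items

-- ===== PORT B =====
-- B's grouping-loop body (top-level so its match compiles separately from A's)
def pvGroupStep (g : PySem.Dict Int (List Int)) (it : List Int) : PySem.Dict Int (List Int) :=
  match it with
  | price :: beauty :: [] => g.modify price [] (fun bs => bs ++ [beauty])
  | [] => g
  | [_] => g
  | _ :: _ :: _ :: _ => g

def dedupe_beauties_alt (items : List (List Int)) : List (Int × Int) :=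
  let groups : PySem.Dict Int (List Int) :=
    items.foldl pvGroupStep PySem.Dict.empty
  let result : PySem.Dict Int Int :=
    groups.items.foldl (fun r pb =>
      r.insert pb.1 ((PySem.List.max? ((-1) :: pb.2) (fun y => y)).getD 0)) PySem.Dict.empty
  (result.insert 0 0).items

-- ===== PRECONDITION & SPEC =====
-- Pre_ excludes exactly the inputs where Python A raises ValueError: an item that does not unpack
-- into [price, beauty] (length ≠ 2).
def Pre_dedupe_beauties (items : List (List Int)) : Prop := ∀ it ∈ items, it.length = 2
instance (items : List (List Int)) : Decidable (Pre_dedupe_beauties items) := by unfold Pre_dedupe_beauties; infer_instance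
def pvWitness_dedupe_beauties : List (List Int) := [[1, 2], [1, 5], [3, -4]]

def Spec_dedupe_beauties (items : List (List Int)) (out : List (Int × Int)) : Prop := out = dedupe_beauties_alt items
instance (items : List (List Int)) (out : List (Int × Int)) : Decidable (Spec_dedupe_beauties items out) := by unfold Spec_dedupe_beauties; infer_instance

-- ===== CLAIM (what is proved, stated in full; the proofs are below) =====
def Claim_equal_dedupe_beauties : Prop := ∀ (items : List (List Int)), Dom_dedupe_beauties items → Pre_dedupe_beauties items → Spec_dedupe_beauties items (dedupe_beauties items)

-- ===== LEMMAS AND PROOFS =====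

-- A's loop body, simplified: the conditional sentinel insert followed by the overwrite is one insert.
lemma stepA_eq (d : PySem.Dict Int Int) (p b : Int) :
    (let d' := if d.contains p then d else d.insert p (-1)
     d'.insert p (max (d'.getD p 0) b)) = d.insert p (max (d.getD p (-1)) b) := by
  by_cases h : d.contains p
  · simp only [h, if_true]
    have hs : (d.get? p).isSome = true := by rw [← PySem.Dict.contains_eq_isSome_get?]; exact h
    rcases Option.isSome_iff_exists.mp hs with ⟨v, hv⟩
    rw [PySem.Dict.getD_of_get?_eq_some d 0 hv, PySem.Dict.getD_of_get?_eq_some d (-1) hv]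
  · have h' : d.contains p = false := by simpa using h
    simp only [h', if_false, Bool.false_eq_true]
    rw [PySem.Dict.getD_insert_self, PySem.Dict.insert_insert_self,
        PySem.Dict.getD_of_not_contains d (-1) h']

-- Invariant of the two grouping loops: same keys (same order), keys nodup,
-- and A's value at each key is the running max max(-1, beauties so far).
lemma loops_inv : ∀ (items : List (List Int)), (∀ it ∈ items, it.length = 2) →
    ∀ (d : PySem.Dict Int Int) (g : PySem.Dict Int (List Int)),
    d.keys = g.keys → d.keys.Nodup →
    (∀ q, d.getD q (-1) = (g.getD q []).foldl max (-1)) →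
    (let dA := items.foldl (fun d it =>
        match it with
        | [price, beauty] =>
          let d := if d.contains price then d else d.insert price (-1)
          d.insert price (max (d.getD price 0) beauty)
        | _ => d) d
     let gB := items.foldl pvGroupStep g
     dA.keys = gB.keys ∧ dA.keys.Nodup ∧
       ∀ q, dA.getD q (-1) = (gB.getD q []).foldl max (-1)) := by
  intro items
  induction items with
  | nil => intro _ d g hk hnd hv; exact ⟨hk, hnd, hv⟩
  | cons it rest ih =>
    intro hlen d g hk hnd hv
    obtain ⟨p, b, rfl⟩ : ∃ p b, it = [p, b] := by
      have := hlen it (List.mem_cons_self ..)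
      match it, this with
      | [p, b], _ => exact ⟨p, b, rfl⟩
    simp only [List.foldl_cons, pvGroupStep]
    rw [stepA_eq]
    apply ih (fun x hx => hlen x (List.mem_cons_of_mem _ hx))
    · have hc : g.contains p = d.contains p := by
        rw [PySem.Dict.contains_eq_decide_mem_keys, PySem.Dict.contains_eq_decide_mem_keys, hk]
      rw [PySem.Dict.keys_modify]
      by_cases hcp : d.contains p = true
      · rw [PySem.Dict.keys_insert_of_contains _ _ hcp,
            PySem.Dict.keys_insert_of_contains _ _ (hc.trans hcp), hk]
      · have hcp' : d.contains p = false := by simpa using hcp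
        rw [PySem.Dict.keys_insert_of_not_contains _ _ hcp',
            PySem.Dict.keys_insert_of_not_contains _ _ (hc.trans hcp'), hk]
    · exact PySem.Dict.nodup_keys_insert _ _ _ hnd
    · intro q
      rw [PySem.Dict.getD_insert, PySem.Dict.getD_modify]
      by_cases hq : q = p
      · simp [hq, hv p, List.foldl_append]
      · simp [hq, hv q]


-- The two result dicts (before the final result[0] = 0) are equal.
lemma dicts_eq (items : List (List Int)) (h2 : ∀ it ∈ items, it.length = 2) :
    items.foldl (fun d it =>
      match it with
      | [price, beauty] =>
        let d := if d.contains price then d else d.insert price (-1)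
        d.insert price (max (d.getD price 0) beauty)
      | _ => d) PySem.Dict.empty =
    (items.foldl pvGroupStep PySem.Dict.empty).items.foldl (fun r pb =>
      r.insert pb.1 ((PySem.List.max? ((-1) :: pb.2) (fun y => y)).getD 0)) PySem.Dict.empty := by
  obtain ⟨hk, hnd, hv⟩ := loops_inv items h2 PySem.Dict.empty PySem.Dict.empty
    (by rw [PySem.Dict.keys_empty, PySem.Dict.keys_empty])
    (by rw [PySem.Dict.keys_empty]; exact List.nodup_nil)
    (fun q => by rw [PySem.Dict.getD_empty, PySem.Dict.getD_empty]; rfl)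
  set dA := items.foldl (fun d it =>
      match it with
      | [price, beauty] =>
        let d := if d.contains price then d else d.insert price (-1)
        d.insert price (max (d.getD price 0) beauty)
      | _ => d) PySem.Dict.empty with hdA
  set gB := items.foldl pvGroupStep PySem.Dict.empty with hgB
  have hgnd : gB.keys.Nodup := hk ▸ hnd
  apply PySem.Dict.ext
  rw [PySem.Dict.items_foldl_insert_fresh gB.items (fun pb => pb.1)
        (fun pb => (PySem.List.max? ((-1) :: pb.2) (fun y => y)).getD 0) PySem.Dict.empty
        (fun a _ => PySem.Dict.contains_empty _)
        (by simp only [PySem.Dict.keys] at hgnd; exact hgnd)]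
  rw [PySem.Dict.items_eq_map_keys dA hnd (-1), PySem.Dict.items_eq_map_keys gB hgnd []]
  have hemp : (PySem.Dict.empty : PySem.Dict Int Int).items = [] := rfl
  simp only [hemp, List.nil_append, List.map_map, hk]
  apply List.map_congr_left
  intro k _
  simp only [Function.comp, PySem.List.max?_id_cons, Option.getD_some, hv k]

-- ===== VERDICT (by name: the statement is the Claim_ definition above) =====
theorem dedupe_beauties_spec : Claim_equal_dedupe_beauties := by
  intro items _ hpre
  unfold Spec_dedupe_beauties dedupe_beauties dedupe_beauties_alt
  show ((items.foldl _ PySem.Dict.empty).insert 0 0).items = _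
  rw [dicts_eq items hpre]
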